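-- pv_equiv track=rewrite | github.com/Yusei406/calvano-replication | src/analysis/state_frequency.py | find_cycles_of_period
-- ===== SOURCE A (Python) =====
-- from typing import Dict, List, Tuple, Optional, Any
-- from collections import defaultdict, Counter
--
-- def find_cycles_of_period(sequence: List, period: int) -> Dict[Tuple, int]:
--     """
--     Find all cycles of a specific period in the sequence.
--
--     Args:
--         sequence: Price sequence (list of values or tuples)
--         period: Cycle period to search for
--
--     Returns:
--         Dictionary mapping cycle patterns to occurrence counts
--     """
--     if len(sequence) < 2 * period:
--         return {}
--
--     cycle_patterns = defaultdict(int)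
--
--     # Extract all possible cycles of this period
--     for start in range(len(sequence) - 2 * period + 1):
--         # Extract potential cycle
--         pattern = tuple(sequence[start:start + period])
--
--         # Check if this pattern repeats immediately
--         next_pattern = tuple(sequence[start + period:start + 2 * period])
--
--         if pattern == next_pattern:
--             cycle_patterns[pattern] += 1
--
--     return dict(cycle_patterns)
-- ===== SOURCE B (Python) =====
-- def find_cycles_of_period(sequence, period):
--     n = len(sequence)
--     if period <= 0 or n < 2 * period:
--         return {}
--     # eq[i] == True  iff  sequence[i] == sequence[i + period]
--     eq = [sequence[i] == sequence[i + period] for i in range(n - period)]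
--     # run[i] = length of the longest block of True values in eq starting at i
--     run = [0]
--     for e in reversed(eq):
--         run.append(run[-1] + 1 if e else 0)
--     run.reverse()
--     counts = {}
--     for start in range(n - 2 * period + 1):
--         if run[start] >= period:
--             pat = tuple(sequence[start:start + period])
--             counts[pat] = counts.get(pat, 0) + 1
--     return counts
-- ===== Notes on version B (the rewrite author's own statement) =====
-- stated objective: alternative
-- what changed: B precomputes eq[i]=(seq[i]==seq[i+period]) once and suffix run lengths of consecutive True values, so a start matches iff run[start]>=period and the pattern tuple is built only on actual matches, instead of A's two fresh length-p slice copies and comparison at every start; B also returns {} for non-positive periods (see differs).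
-- intended difference: For period <= 0, A still scans and, via empty and negative-wraparound slices, returns counts of accidental patterns (e.g. A([], 0) = {(): 1}); B returns {}, the intended value, since no cycle has a non-positive period. — e.g. on find_cycles_of_period([], 0): A returns [([], 1)], B returns []
import Mathlib
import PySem

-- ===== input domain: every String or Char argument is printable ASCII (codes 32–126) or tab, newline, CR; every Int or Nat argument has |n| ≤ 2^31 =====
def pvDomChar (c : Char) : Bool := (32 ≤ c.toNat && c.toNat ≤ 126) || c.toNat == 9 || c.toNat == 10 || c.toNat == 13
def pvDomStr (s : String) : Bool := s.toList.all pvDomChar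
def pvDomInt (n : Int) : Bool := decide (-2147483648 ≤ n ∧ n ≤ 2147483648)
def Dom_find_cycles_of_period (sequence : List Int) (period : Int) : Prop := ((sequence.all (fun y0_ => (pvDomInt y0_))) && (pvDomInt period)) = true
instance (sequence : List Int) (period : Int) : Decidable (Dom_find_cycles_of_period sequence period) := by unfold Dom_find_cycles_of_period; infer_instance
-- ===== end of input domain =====

-- B replaces A's per-start slice comparison by a precomputed equality array with suffix run
-- lengths (pattern built only on a match) and returns {} for non-positive periods (see D_ below).


-- ===== PORT A =====
def find_cycles_of_period (sequence : List Int) (period : Int) : List (List Int × Int) :=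
  if PySem.List.len sequence < 2 * period then []
  else
    ((PySem.List.pyRange 0 (PySem.List.len sequence - 2 * period + 1) 1).foldl
      (fun cycle_patterns start =>
        let pattern := PySem.List.slice sequence (some start) (some (start + period))
        let next_pattern := PySem.List.slice sequence (some (start + period)) (some (start + 2 * period))
        if pattern == next_pattern then PySem.Dict.modify cycle_patterns pattern 0 (· + 1)
        else cycle_patterns)
      PySem.Dict.empty).items

-- ===== PORT B =====
-- run is built back-to-front in Source B (append over reversed(eq), then reverse): a foldr.
def find_cycles_of_period_alt (sequence : List Int) (period : Int) : List (List Int × Int) :=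
  let n := PySem.List.len sequence
  if period ≤ 0 ∨ n < 2 * period then []
  else
    let eq := (PySem.List.pyRange 0 (n - period) 1).map
      (fun i => PySem.List.pyGetD sequence i 0 == PySem.List.pyGetD sequence (i + period) 0)
    let run := eq.foldr (fun e acc => (if e then acc.headD 0 + 1 else 0) :: acc) [(0 : Int)]
    ((PySem.List.pyRange 0 (n - 2 * period + 1) 1).foldl
      (fun counts start =>
        if period ≤ PySem.List.pyGetD run start 0 then
          let pat := PySem.List.slice sequence (some start) (some (start + period))
          counts.insert pat (counts.getD pat 0 + 1)
        else counts)
      PySem.Dict.empty).items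

-- ===== PRECONDITION & SPEC =====
-- For period ≤ 0, A still scans and — via empty and negative-wraparound slices — returns counts
-- of accidental patterns (e.g. A([], 0) = {(): 1}); B returns {}, the intended value, since no
-- cycle has a non-positive period.
def D_find_cycles_of_period (sequence : List Int) (period : Int) : Prop := period ≤ 0
instance (sequence : List Int) (period : Int) : Decidable (D_find_cycles_of_period sequence period) := by unfold D_find_cycles_of_period; infer_instance
def Spec_find_cycles_of_period (sequence : List Int) (period : Int) (out : List (List Int × Int)) : Prop := ¬ D_find_cycles_of_period sequence period → out = find_cycles_of_period_alt sequence period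
instance (sequence : List Int) (period : Int) (out : List (List Int × Int)) : Decidable (Spec_find_cycles_of_period sequence period out) := by unfold Spec_find_cycles_of_period; infer_instance
def pvDiffWitness_find_cycles_of_period : List Int × Int := ([], 0)
def pvDiffWitnessOut_find_cycles_of_period : (List (List Int × Int)) × (List (List Int × Int)) := ([([], 1)], [])

-- ===== CLAIM (what is proved, stated in full; the proofs are below) =====
def Claim_unchanged_find_cycles_of_period : Prop := ∀ (sequence : List Int) (period : Int), Dom_find_cycles_of_period sequence period → Spec_find_cycles_of_period sequence period (find_cycles_of_period sequence period)
def Claim_changed_find_cycles_of_period : Prop := Dom_find_cycles_of_period (pvDiffWitness_find_cycles_of_period.1) (pvDiffWitness_find_cycles_of_period.2) ∧ D_find_cycles_of_period (pvDiffWitness_find_cycles_of_period.1) (pvDiffWitness_find_cycles_of_period.2) ∧ find_cycles_of_period (pvDiffWitness_find_cycles_of_period.1) (pvDiffWitness_find_cycles_of_period.2) = pvDiffWitnessOut_find_cycles_of_period.1 ∧ find_cycles_of_period_alt (pvDiffWitness_find_cycles_of_period.1) (pvDiffWitness_find_cycles_of_period.2) = pvDiffWitnessOut_find_cycles_of_period.2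 ∧ pvDiffWitnessOut_find_cycles_of_period.1 ≠ pvDiffWitnessOut_find_cycles_of_period.2

def Claim_exact_find_cycles_of_period : Prop := ∀ (sequence : List Int) (period : Int), Dom_find_cycles_of_period sequence period → D_find_cycles_of_period sequence period → find_cycles_of_period sequence period ≠ find_cycles_of_period_alt sequence period

-- ===== LEMMAS AND PROOFS =====

-- the run-length list of Source B, as the foldr the port of B uses
def pvRuns (l : List Bool) : List Int :=
  l.foldr (fun e acc => (if e then acc.headD 0 + 1 else 0) :: acc) [(0 : Int)]

theorem pvRuns_cons (e : Bool) (t : List Bool) :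
    pvRuns (e :: t) = (if e then (pvRuns t).headD 0 + 1 else 0) :: pvRuns t := rfl

theorem pvRuns_ne_nil (l : List Bool) : pvRuns l ≠ [] := by
  cases l <;> simp [pvRuns]

theorem pvRuns_headD (l : List Bool) : (pvRuns l).headD 0 = (pvRuns l).getD 0 0 := by
  cases h : pvRuns l with
  | nil => exact absurd h (pvRuns_ne_nil l)
  | cons a as => simp

theorem pvRuns_nonneg (l : List Bool) (i : Nat) : 0 ≤ (pvRuns l).getD i 0 := by
  induction l generalizing i with
  | nil => cases i <;> simp [pvRuns]
  | cons e t ih =>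
    rw [pvRuns_cons]
    cases i with
    | zero =>
      simp only [List.getD_cons_zero]
      split
      · rw [pvRuns_headD]; have := ih 0; omega
      · omega
    | succ i' => simpa using ih i'

theorem pvRuns_ge_iff (l : List Bool) (i k : Nat) (h : i + k ≤ l.length) :
    ((k : Int) ≤ (pvRuns l).getD i 0) ↔ ∀ j < k, l.getD (i + j) false = true := by
  induction l generalizing i k with
  | nil =>
    have hk : k = 0 := by simp at h; omega
    subst hk
    simp only [Nat.cast_zero]
    exact iff_of_true (pvRuns_nonneg _ i) (fun j hj => absurd hj (Nat.not_lt_zero j))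
  | cons e t ih =>
    cases i with
    | succ i' =>
      rw [pvRuns_cons]
      simp only [List.getD_cons_succ]
      rw [ih i' k (by simp at h; omega)]
      have hidx : ∀ j : Nat, (e :: t).getD (i' + 1 + j) false = t.getD (i' + j) false := by
        intro j
        rw [show i' + 1 + j = (i' + j) + 1 by omega]
        simp
      exact forall_congr' fun j => forall_congr' fun hj => by rw [hidx j]
    | zero =>
      cases k with
      | zero =>
        simp only [Nat.cast_zero]
        exact iff_of_true (pvRuns_nonneg _ 0) (fun j hj => absurd hj (Nat.not_lt_zero j))
      | succ k' =>
        rw [pvRuns_cons]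
        simp only [List.getD_cons_zero]
        cases e with
        | false =>
          simp only [if_neg Bool.false_ne_true]
          constructor
          · intro hle
            exfalso
            have : (0 : Int) < (k' + 1 : Nat) := by exact_mod_cast Nat.succ_pos k'
            omega
          · intro hall
            exact absurd (hall 0 (Nat.succ_pos _)) (by simp)
        | true =>
          rw [if_pos rfl]
          rw [pvRuns_headD]
          have ihk := ih 0 k' (by simp at h ⊢; omega)
          constructor
          · intro hle j hj
            cases j with
            | zero => simp
            | succ j' =>
              have hk' : (k' : Int) ≤ (pvRuns t).getD 0 0 := by push_cast at hle; omega
              have := (ihk.mp hk') j' (by omega)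
              simpa [show 0 + (j' + 1) = (0 + j') + 1 by omega] using this
          · intro hall
            have : ∀ j < k', t.getD (0 + j) false = true := by
              intro j hj
              have := hall (j + 1) (by omega)
              simpa [show 0 + (j + 1) = (0 + j) + 1 by omega] using this
            have := ihk.mpr this
            push_cast
            omega

theorem pv_slice_eq_iff (seq : List Int) (s p : Nat) (h : s + (p + p) ≤ seq.length) :
    ((seq.drop s).take p = (seq.drop (s + p)).take p) ↔
      ∀ j < p, seq.getD (s + j) 0 = seq.getD (s + j + p) 0 := by
  constructor
  · intro heq j hj
    have := congrArg (fun l => l[j]?) heq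
    simp only [List.getElem?_take_of_lt hj, List.getElem?_drop] at this
    rw [List.getD_eq_getElem?_getD, List.getD_eq_getElem?_getD,
      show s + p + j = s + j + p by omega] at *
    rw [this]
  · intro hall
    apply List.ext_getElem?
    intro i
    by_cases hi : i < p
    · simp only [List.getElem?_take_of_lt hi, List.getElem?_drop]
      have := hall i hi
      rw [List.getD_eq_getElem?_getD, List.getD_eq_getElem?_getD] at this
      have h1 : s + i < seq.length := by omega
      have h2 : s + i + p < seq.length := by omega
      rw [List.getElem?_eq_getElem h1, List.getElem?_eq_getElem h2] at this
      simp only [Option.getD_some] at this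
      rw [show s + p + i = s + i + p by omega, List.getElem?_eq_getElem h1,
        List.getElem?_eq_getElem h2, this]
    · rw [List.getElem?_eq_none, List.getElem?_eq_none] <;> simp <;> omega

theorem pv_modify_eq_insert (d : PySem.Dict (List Int) Int) (k : List Int) :
    PySem.Dict.modify d k 0 (· + 1) = d.insert k (d.getD k 0 + 1) :=
  PySem.Dict.ext_iff.mpr rfl

theorem pv_main (sequence : List Int) (period : Int) (hp : 0 < period) :
    find_cycles_of_period sequence period = find_cycles_of_period_alt sequence period := by
  unfold find_cycles_of_period find_cycles_of_period_alt
  simp only [PySem.List.len_eq]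
  by_cases hlt : (sequence.length : Int) < 2 * period
  · rw [if_pos hlt, if_pos (Or.inr hlt)]
  · rw [if_neg hlt, if_neg (by push Not; exact ⟨hp, not_lt.mp hlt⟩)]
    congr 1
    apply PySem.List.foldl_congr_mem
    intro d start hmem
    rw [PySem.List.mem_pyRange_one] at hmem
    obtain ⟨h0, h1⟩ := hmem
    set p := period.toNat with hpdef
    set s := start.toNat with hsdef
    have hpc : period = (p : Int) := (Int.toNat_of_nonneg (le_of_lt hp)).symm
    have hsc : start = (s : Int) := (Int.toNat_of_nonneg h0).symm
    have hbound : s + (p + p) ≤ sequence.length := by omega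
    rw [hpc, hsc]
    have e1 : (s : Int) + (p : Int) = ((s + p : Nat) : Int) := by push_cast; ring
    have e2 : (s : Int) + 2 * (p : Int) = ((s + p : Nat) : Int) + ((p : Nat) : Int) := by
      push_cast; ring
    rw [e2, e1, PySem.List.slice_natCast_add, PySem.List.slice_natCast,
      show s + p - s = p by omega, PySem.List.pyGetD_natCast]
    set eqL := (PySem.List.pyRange 0 ((sequence.length : Int) - (p : Int)) 1).map
      (fun i => PySem.List.pyGetD sequence i 0 == PySem.List.pyGetD sequence (i + (p : Int)) 0)
      with heqL
    have hlen : eqL.length = sequence.length - p := by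
      rw [heqL, List.length_map, PySem.List.length_pyRange_one]; omega
    have hrun : (eqL.foldr (fun e acc => (if e then acc.headD 0 + 1 else 0) :: acc) [(0 : Int)])
        = pvRuns eqL := rfl
    rw [hrun]
    have hiff : ((sequence.drop s).take p = (sequence.drop (s + p)).take p) ↔
        ((p : Int) ≤ (pvRuns eqL).getD s 0) := by
      rw [pv_slice_eq_iff sequence s p hbound, pvRuns_ge_iff eqL s p (by omega)]
      apply forall_congr'
      intro j
      apply forall_congr'
      intro hj
      have hgd : eqL.getD (s + j) false =
          (PySem.List.pyGetD sequence ((s + j : Nat) : Int) 0 ==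
            PySem.List.pyGetD sequence (((s + j : Nat) : Int) + (p : Int)) 0) := by
        rw [List.getD_eq_getElem?_getD, heqL, List.getElem?_map,
          PySem.List.getElem?_pyRange_one, if_pos (by omega : s + j < (((sequence.length : Int) - (p : Int)) - 0).toNat)]
        simp only [Option.map_some, Option.getD_some, zero_add]
      rw [hgd,
        show ((s + j : Nat) : Int) + (p : Int) = ((s + j + p : Nat) : Int) by push_cast; ring,
        PySem.List.pyGetD_natCast, PySem.List.pyGetD_natCast, beq_iff_eq,
        List.getD_eq_getElem?_getD, List.getD_eq_getElem?_getD]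
    by_cases hc : (sequence.drop s).take p = (sequence.drop (s + p)).take p
    · rw [if_pos (by rwa [beq_iff_eq]), if_pos (hiff.mp hc)]
      exact pv_modify_eq_insert d _
    · rw [if_neg (by rwa [beq_iff_eq, ← hiff] at *), if_neg (by rwa [← hiff])]

-- a contains-fact survives the rest of A's loop
theorem pv_contains_foldl (sequence : List Int) (period : Int) (l : List Int)
    (d : PySem.Dict (List Int) Int) (k : List Int) (h : d.contains k = true) :
    (l.foldl
      (fun cycle_patterns start =>
        let pattern := PySem.List.slice sequence (some start) (some (start + period))
        let next_pattern := PySem.List.slice sequence (some (start + period)) (some (start + 2 * period))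
        if pattern == next_pattern then PySem.Dict.modify cycle_patterns pattern 0 (· + 1)
        else cycle_patterns)
      d).contains k = true := by
  induction l generalizing d with
  | nil => exact h
  | cons x t ih =>
    apply ih
    simp only []
    split
    · rw [PySem.Dict.contains_modify, h, Bool.or_true]
    · exact h

theorem pv_foldl_items_ne_nil (sequence : List Int) (period : Int) (l : List Int)
    (d : PySem.Dict (List Int) Int) (h : d.contains ([] : List Int) = true) :
    (l.foldl
      (fun cycle_patterns start =>
        let pattern := PySem.List.slice sequence (some start) (some (start + period))
        let next_pattern := PySem.List.slice sequence (some (start + period)) (some (start + 2 * period))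
        if pattern == next_pattern then PySem.Dict.modify cycle_patterns pattern 0 (· + 1)
        else cycle_patterns)
      d).items ≠ [] := by
  intro hit
  have hc := pv_contains_foldl sequence period l d ([] : List Int) h
  rw [PySem.Dict.contains_iff_mem_keys] at hc
  simp only [PySem.Dict.keys, hit] at hc
  simp at hc

theorem pv_A_ne_nil (sequence : List Int) (period : Int) (hp : period ≤ 0) :
    find_cycles_of_period sequence period ≠ [] := by
  unfold find_cycles_of_period
  rw [if_neg (by simp only [PySem.List.len_eq]; omega)]
  set s0 : Int := -2 * period with hs0
  have h1 : (0 : Int) ≤ s0 := by omega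
  have h2 : s0 < PySem.List.len sequence - 2 * period + 1 := by
    simp only [PySem.List.len_eq]; have := Int.natCast_nonneg sequence.length; omega
  rw [PySem.List.pyRange_one_append 0 s0 _ h1 (by omega),
    PySem.List.pyRange_one_cons h2, List.foldl_append, List.foldl_cons]
  have hsl1 : PySem.List.slice sequence (some s0) (some (s0 + period)) = [] := by
    rw [PySem.List.slice_toNat (a := s0) (b := s0 + period) sequence (by omega) (by omega),
      show (s0 + period).toNat - s0.toNat = 0 by omega]
    simp
  have hsl2 : PySem.List.slice sequence (some (s0 + period)) (some (s0 + 2 * period)) = [] := by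
    rw [PySem.List.slice_toNat (a := s0 + period) (b := s0 + 2 * period) sequence (by omega) (by omega),
      show (s0 + 2 * period).toNat - (s0 + period).toNat = 0 by omega]
    simp
  have hstep : ∀ d : PySem.Dict (List Int) Int,
      ((if (PySem.List.slice sequence (some s0) (some (s0 + period)) ==
          PySem.List.slice sequence (some (s0 + period)) (some (s0 + 2 * period))) = true then
        PySem.Dict.modify d (PySem.List.slice sequence (some s0) (some (s0 + period))) 0 (· + 1)
      else d)).contains ([] : List Int) = true := by
    intro d
    rw [hsl1, hsl2, if_pos (by simp : (([] : List Int) == []) = true), PySem.Dict.contains_modify]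
    simp
  exact pv_foldl_items_ne_nil sequence period _ _ (hstep _)

-- ===== VERDICT (by name: the statement is the Claim_ definition above) =====
theorem find_cycles_of_period_spec : Claim_unchanged_find_cycles_of_period := by
  intro sequence period _ hnd
  unfold D_find_cycles_of_period at hnd
  exact pv_main sequence period (by omega)

theorem find_cycles_of_period_changed : Claim_changed_find_cycles_of_period := by
  unfold Claim_changed_find_cycles_of_period; decide

theorem find_cycles_of_period_tight : Claim_exact_find_cycles_of_period := by
  intro sequence period _ hd
  unfold D_find_cycles_of_period at hd
  have hB : find_cycles_of_period_alt sequence period = [] := by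
    simp [find_cycles_of_period_alt, hd]
  rw [hB]
  exact pv_A_ne_nil sequence period hd
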